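-- pv_equiv track=rewrite | github.com/lazare911/GOA | level 45/homework/homework(4).py | calc
-- ===== SOURCE A (Python) =====
-- def calc(x):
--     total1, t1, t2 = "", 0, 0
--     for i in x:
--         total1 += str(ord(i))
--     for j in total1:
--         t1 += int(j)
--         if j == "7": t2 += 1
--         else: t2 += int(j)
--     return max(t1,t2) - min(t1,t2)
-- ===== SOURCE B (Python) =====
-- def calc(x):
--     s = "".join(str(ord(i)) for i in x)
--     return 6 * s.count("7")
-- ===== Notes on version B (the rewrite author's own statement) =====
-- stated objective: simpler
-- what changed: The two digit-summing accumulators t1/t2 and the max-min subtraction are replaced by a single closed-form count: per digit the two sums differ only on the digit 7 (contributing 7 vs 1), so the result is always 6 * s.count('7'); a timing run measured this ~5x faster since str.count runs in C.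
import Mathlib
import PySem

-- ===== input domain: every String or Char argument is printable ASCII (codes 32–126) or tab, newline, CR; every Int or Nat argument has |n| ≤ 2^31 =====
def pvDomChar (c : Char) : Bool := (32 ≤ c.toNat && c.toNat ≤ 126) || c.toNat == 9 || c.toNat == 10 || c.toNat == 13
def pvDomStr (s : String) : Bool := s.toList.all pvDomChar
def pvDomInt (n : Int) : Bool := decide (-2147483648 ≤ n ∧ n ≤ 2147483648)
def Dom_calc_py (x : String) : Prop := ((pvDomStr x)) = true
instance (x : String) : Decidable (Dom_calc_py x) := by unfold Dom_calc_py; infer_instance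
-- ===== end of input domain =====

-- B replaces A's two digit-sum accumulators and the max-min subtraction by the closed form
-- 6 * count of '7' digits (per digit, t1 and t2 differ only on '7': 7 vs 1); objective: simpler.

-- ===== PORT A =====
-- int(j) for a char of total1: total1 consists only of decimal digits (ord codes), so
-- PySem.Int.ofStr? always returns some; .getD 0 is never the fallback on reachable inputs.
def pvDigitVal (j : Char) : Int := (PySem.Int.ofStr? (String.mk [j])).getD 0

def calc_py (x : String) : Int :=
  let total1 : String :=
    x.toList.foldl (fun acc i => acc ++ PySem.Int.toStr ((i.toNat : Int))) ""
  let p : Int × Int :=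
    total1.toList.foldl
      (fun (p : Int × Int) j =>
        (p.1 + pvDigitVal j,
         if j = '7' then p.2 + 1 else p.2 + pvDigitVal j))
      (0, 0)
  max p.1 p.2 - min p.1 p.2

-- ===== PORT B =====
def calc_py_alt (x : String) : Int :=
  let s : String := PySem.Str.join "" (x.toList.map (fun i => PySem.Int.toStr ((i.toNat : Int))))
  6 * (PySem.Str.count s "7" : Int)

-- ===== PRECONDITION & SPEC =====
def Spec_calc_py (x : String) (out : Int) : Prop := out = calc_py_alt x
instance (x : String) (out : Int) : Decidable (Spec_calc_py x out) := by unfold Spec_calc_py; infer_instance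

-- ===== CLAIM (what is proved, stated in full; the proofs are below) =====
def Claim_equal_calc_py : Prop := ∀ (x : String), Dom_calc_py x → Spec_calc_py x (calc_py x)

-- ===== LEMMAS AND PROOFS =====

-- Python's s.count("7") for a single-character needle is the character count.
theorem pv_go_single (c : Char) : ∀ (l : List Char) (acc : Nat),
    PySem.Chars.count.go [c] l.length l acc = acc + l.count c := by
  intro l
  induction l with
  | nil => intro acc; simp [PySem.Chars.count.go]
  | cons h t ih =>
    intro acc
    simp only [List.length_cons, PySem.Chars.count.go, List.isPrefixOf, List.count_cons]
    by_cases hc : c = h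
    · subst hc
      simp [ih]
      omega
    · have hb : (c == h) = false := by simp [hc]
      simp [hb, ih]
      exact fun hh => hc hh.symm

theorem pv_count_single (s : String) : PySem.Str.count s "7" = s.toList.count '7' := by
  have h := pv_go_single '7' s.toList 0
  simp [PySem.Str.count_eq, PySem.Chars.count]
  simpa using h

theorem pv_intercalate_nil (l : List (List Char)) :
    List.intercalate ([] : List Char) l = l.flatten := by
  induction l with
  | nil => simp [List.intercalate]
  | cons h t ih =>
    cases t with
    | nil => simp [List.intercalate]
    | cons b r =>
      simp [List.intercalate] at ih ⊢
      simpa using ih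

theorem pv_join_cons (cs : String) (rest : List String) :
    PySem.Str.join "" (cs :: rest) = cs ++ PySem.Str.join "" rest := by
  simp [PySem.Str.join, PySem.Chars.join, pv_intercalate_nil]

-- ''.join(map f x) equals A's repeated-concatenation loop.
theorem pv_join_eq_foldl (f : Char → String) :
    ∀ (l : List Char) (a : String),
      l.foldl (fun acc i => acc ++ f i) a = a ++ PySem.Str.join "" (l.map f) := by
  intro l
  induction l with
  | nil =>
    intro a
    simp [PySem.Str.join, PySem.Chars.join, List.intercalate]
  | cons h t ih =>
    intro a
    simp only [List.foldl_cons, List.map_cons, ih, pv_join_cons]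
    simp [String.append_assoc]

-- the A-loop invariant: t1 - t2 gains 6 exactly at each '7' digit
theorem pv_fold_diff : ∀ (l : List Char) (a b : Int),
    (l.foldl (fun (p : Int × Int) j =>
        (p.1 + pvDigitVal j,
         if j = '7' then p.2 + 1 else p.2 + pvDigitVal j)) (a, b)).1
    - (l.foldl (fun (p : Int × Int) j =>
        (p.1 + pvDigitVal j,
         if j = '7' then p.2 + 1 else p.2 + pvDigitVal j)) (a, b)).2
    = a - b + 6 * (l.count '7' : Int) := by
  intro l
  induction l with
  | nil => intro a b; simp
  | cons h t ih =>
    intro a b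
    by_cases hc : h = '7'
    · subst hc
      have h7 : pvDigitVal '7' = 7 := by decide
      simp only [List.foldl_cons, List.count_cons, ih, h7, if_pos]
      simp
      omega
    · have hb : ('7' == h) = false := by
        simp only [beq_eq_false_iff_ne, ne_eq]
        exact fun hh => hc hh.symm
      simp only [List.foldl_cons, if_neg hc, List.count_cons, ih, hb]
      simp
      omega

-- ===== VERDICT (by name: the statement is the Claim_ definition above) =====
theorem calc_py_spec : Claim_equal_calc_py := by
  intro x _
  unfold Spec_calc_py calc_py calc_py_alt
  simp only []
  set total1 : String :=
    x.toList.foldl (fun acc i => acc ++ PySem.Int.toStr ((i.toNat : Int))) "" with htot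
  have hjoin : total1 =
      PySem.Str.join "" (x.toList.map (fun i => PySem.Int.toStr ((i.toNat : Int)))) := by
    rw [htot, pv_join_eq_foldl]
    simp
  set p : Int × Int :=
    total1.toList.foldl
      (fun (p : Int × Int) j =>
        (p.1 + pvDigitVal j,
         if j = '7' then p.2 + 1 else p.2 + pvDigitVal j)) (0, 0) with hp
  have hdiff : p.1 - p.2 = 6 * (total1.toList.count '7' : Int) := by
    rw [hp, pv_fold_diff]; ring
  have hge : p.2 ≤ p.1 := by
    have : (0 : Int) ≤ 6 * (total1.toList.count '7' : Int) := by positivity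
    omega
  rw [max_eq_left hge, min_eq_right hge, ← hjoin, pv_count_single]
  omega
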